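-- pv_equiv track=rewrite | github.com/spruceb/brainfuck | brainfuck.py | remove_pairs
-- ===== SOURCE A (Python) =====
-- def remove_pairs(string, pair):
--     '''Remove sequential occurrences of canceling values
--
--     Used to remove things like ++-- from brainfuck code, as this would
--     just do nothing, or collapse >>><< to just >
--     '''
--     result = []
--     count = [0, 0]
--     pair_seq = False
--
--     # this sub-function just checks the counts for which of the pair
--     # occurred more, then appends their difference to the result
--     # this has the effect of turning +++-- into just +
--     def end_seq():
--         if count == [0, 0]:
--             return
--         most_in_seq = pair[count[0] <= count[1]]
--         diff = abs(count[0] - count[1])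
--         result.append(most_in_seq * diff)
--         count[0] = count[1] = 0
--
--     # goes through each character, appending to result unless it's part
--     # of a pair sequence, then collapses those as much as possible
--     for c in string:
--         if c not in pair:
--             if pair_seq:
--                 end_seq()
--                 pair_seq = False
--             result.append(c)
--         else:
--             count[pair.index(c)] += 1
--             pair_seq = True
--     end_seq()
--     return ''.join(result)
-- ===== SOURCE B (Python) =====
-- def remove_pairs(string, pair):
--     '''Remove sequential occurrences of canceling values'''
--     stack = []
--     for c in string:
--         if c in pair and stack and stack[-1] in pair and stack[-1] != c:
--             stack.pop()
--         else:
--             stack.append(c)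
--     return ''.join(stack)
-- ===== Notes on version B (the rewrite author's own statement) =====
-- stated objective: idiomatic
-- what changed: Replaces A's run-counting machinery (two counters, a pair_seq flag and an end_seq flush that appends the net surplus) with a single output stack: a pair character cancels against an opposite pair character on top of the stack, everything else is pushed.
import Mathlib
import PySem

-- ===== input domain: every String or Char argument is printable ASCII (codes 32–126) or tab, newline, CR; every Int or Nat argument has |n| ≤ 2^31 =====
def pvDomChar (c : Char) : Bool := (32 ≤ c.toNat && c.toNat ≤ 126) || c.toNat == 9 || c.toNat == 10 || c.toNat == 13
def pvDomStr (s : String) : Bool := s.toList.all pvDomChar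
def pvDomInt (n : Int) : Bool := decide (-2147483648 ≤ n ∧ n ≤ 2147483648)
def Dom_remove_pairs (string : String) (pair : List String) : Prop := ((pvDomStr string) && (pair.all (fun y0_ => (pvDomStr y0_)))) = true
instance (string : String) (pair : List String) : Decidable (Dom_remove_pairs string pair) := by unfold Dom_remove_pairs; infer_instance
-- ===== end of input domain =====

-- B replaces A's run counters + end_seq flush with a single cancellation stack (idiomatic; same cost).

-- ===== PORT A =====
-- the inner helper end_seq: flush the surplus of the dominant pair symbol onto result, reset counts
def rp_endSeq (pair : List String) (res : List String) (c0 c1 : Int) : List String :=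
  if c0 = 0 ∧ c1 = 0 then res
  else
    -- pair[count[0] <= count[1]] ; in-range whenever the counts arose from pair.index hits (the getD "" is never read then)
    let most := (PySem.List.pyGet? pair (if decide (c0 ≤ c1) then 1 else 0)).getD ""
    res ++ [String.ofList (PySem.List.pyRepeat most.toList |c0 - c1|)]   -- most_in_seq * diff

-- one iteration of A's loop over the characters
def rp_step (pair : List String) (st : List String × Int × Int × Bool) (c : Char) :
    List String × Int × Int × Bool :=
  match st with
  | (res, c0, c1, ps) =>
    if String.singleton c ∉ pair then
      if ps then (rp_endSeq pair res c0 c1 ++ [String.singleton c], 0, 0, false)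
      else (res ++ [String.singleton c], c0, c1, false)
    else
      match PySem.List.index? pair (String.singleton c) with
      | some 0 => (res, c0 + 1, c1, true)
      | some 1 => (res, c0, c1 + 1, true)
      | _ => (res, c0, c1, true)   -- pair.index(c) ≥ 2: Python raises IndexError here (excluded by Pre_)

def remove_pairs (string : String) (pair : List String) : String :=
  let st := string.toList.foldl (rp_step pair) ([], 0, 0, false)
  PySem.Str.join "" (rp_endSeq pair st.1 st.2.1 st.2.2.1)

-- ===== PORT B =====
-- one iteration of B's loop: cancel against an opposite pair char on top of the stack, else push
def rpb_step (pair : List String) (stack : List Char) (c : Char) : List Char :=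
  if decide (String.singleton c ∈ pair) &&
      (match stack.getLast? with
       | some t => decide (String.singleton t ∈ pair) && (t != c)
       | none => false) then
    stack.dropLast
  else stack ++ [c]

def remove_pairs_alt (string : String) (pair : List String) : String :=
  String.ofList (string.toList.foldl (rpb_step pair) [])

-- ===== PRECONDITION & SPEC =====
-- Pre_ excludes exactly the inputs where A raises IndexError: a character whose first index in pair is ≥ 2.
def Pre_remove_pairs (string : String) (pair : List String) : Prop :=
  (string.toList.all fun c => decide ((PySem.List.index? pair (String.singleton c)).getD 0 < 2)) = true
instance (string : String) (pair : List String) : Decidable (Pre_remove_pairs string pair) := by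
  unfold Pre_remove_pairs; infer_instance

def pvWitness_remove_pairs : String × List String := ("+a-", ["+", "-"])

def Spec_remove_pairs (string : String) (pair : List String) (out : String) : Prop := out = remove_pairs_alt string pair
instance (string : String) (pair : List String) (out : String) : Decidable (Spec_remove_pairs string pair out) := by unfold Spec_remove_pairs; infer_instance

-- ===== CLAIM (what is proved, stated in full; the proofs are below) =====
def Claim_equal_remove_pairs : Prop := ∀ (string : String) (pair : List String), Dom_remove_pairs string pair → Pre_remove_pairs string pair → Spec_remove_pairs string pair (remove_pairs string pair)

-- ===== LEMMAS AND PROOFS =====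

-- the characters A's result list denotes
def rpRender (res : List String) : List Char := (res.map String.toList).flatten

-- the pending (not yet flushed) surplus of the current pair run, as characters
def rpResid (pair : List String) (c0 c1 : Int) : List Char :=
  if c0 = 0 ∧ c1 = 0 then []
  else PySem.List.pyRepeat (((PySem.List.pyGet? pair (if decide (c0 ≤ c1) then 1 else 0)).getD "").toList) |c0 - c1|

-- the coupling invariant between A's loop state and B's stack
def rpInv (pair : List String) (st : List String × Int × Int × Bool) (stack : List Char) : Prop :=
  match st with
  | (res, c0, c1, ps) =>
    0 ≤ c0 ∧ 0 ≤ c1 ∧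
    (ps = false → c0 = 0 ∧ c1 = 0) ∧
    (0 < c0 → ∃ ch, pair[0]? = some (String.singleton ch)) ∧
    (0 < c1 → ∃ ch, pair[1]? = some (String.singleton ch) ∧ pair[0]? ≠ some (String.singleton ch)) ∧
    (∀ t, (rpRender res).getLast? = some t → String.singleton t ∉ pair) ∧
    stack = rpRender res ++ rpResid pair c0 c1

theorem rp_step_def (pair : List String) (res : List String) (c0 c1 : Int) (ps : Bool) (c : Char) :
    rp_step pair (res, c0, c1, ps) c =
      if String.singleton c ∉ pair then
        if ps then (rp_endSeq pair res c0 c1 ++ [String.singleton c], 0, 0, false)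
        else (res ++ [String.singleton c], c0, c1, false)
      else
        match PySem.List.index? pair (String.singleton c) with
        | some 0 => (res, c0 + 1, c1, true)
        | some 1 => (res, c0, c1 + 1, true)
        | _ => (res, c0, c1, true) := rfl

theorem rpResid_eq0 (pair : List String) (c0 c1 : Int) (h : c0 = c1) :
    rpResid pair c0 c1 = [] := by
  unfold rpResid
  split
  · rfl
  · have h2 : c0 - c1 = 0 := by omega
    simp [h2, PySem.List.pyRepeat]

theorem rpResid_lt (pair : List String) (c0 c1 : Int) (ch : Char) (h : c1 < c0)
    (hp : pair[0]? = some (String.singleton ch)) :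
    rpResid pair c0 c1 = List.replicate (c0 - c1).toNat ch := by
  unfold rpResid
  have hne : ¬ (c0 = 0 ∧ c1 = 0) := by omega
  have hle : decide (c0 ≤ c1) = false := by simp; omega
  have habs : |c0 - c1| = c0 - c1 := abs_of_nonneg (by omega)
  rw [if_neg hne, hle, habs]
  simp only [if_false, Bool.false_eq_true, PySem.List.pyGet?_zero, hp, Option.getD_some]
  rw [show (String.singleton ch).toList = [ch] by simp, PySem.List.pyRepeat_singleton]

theorem rpResid_gt (pair : List String) (c0 c1 : Int) (ch : Char) (h : c0 < c1)
    (hp : pair[1]? = some (String.singleton ch)) :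
    rpResid pair c0 c1 = List.replicate (c1 - c0).toNat ch := by
  unfold rpResid
  have hne : ¬ (c0 = 0 ∧ c1 = 0) := by omega
  have hle : decide (c0 ≤ c1) = true := by simp; omega
  have habs : |c0 - c1| = -(c0 - c1) := abs_of_nonpos (by omega)
  rw [if_neg hne, hle, habs]
  have h1 : PySem.List.pyGet? pair 1 = pair[1]? := by simp [pysem]
  simp only [if_true, h1, hp, Option.getD_some]
  rw [show (String.singleton ch).toList = [ch] by simp, PySem.List.pyRepeat_singleton]
  congr 1
  omega

theorem rpRender_append_singleton (res : List String) (s : String) :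
    rpRender (res ++ [s]) = rpRender res ++ s.toList := by
  simp [rpRender]

theorem rpRender_endSeq (pair : List String) (res : List String) (c0 c1 : Int) :
    rpRender (rp_endSeq pair res c0 c1) = rpRender res ++ rpResid pair c0 c1 := by
  unfold rp_endSeq rpResid
  split
  · simp
  · simp [rpRender]

theorem getLast?_append_replicate_succ (a : List Char) (n : Nat) (x : Char) :
    (a ++ List.replicate (n + 1) x).getLast? = some x := by
  rw [List.replicate_succ', ← List.append_assoc]; exact List.getLast?_concat

theorem dropLast_append_replicate_succ (a : List Char) (n : Nat) (x : Char) :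
    (a ++ List.replicate (n + 1) x).dropLast = a ++ List.replicate n x := by
  rw [List.replicate_succ', ← List.append_assoc]; simp

-- B's loop body as two rewrite rules, driven by the top of the stack
theorem rpb_step_push (pair : List String) (stack : List Char) (c : Char)
    (h : ∀ t, stack.getLast? = some t → String.singleton t ∉ pair ∨ t = c) :
    rpb_step pair stack c = stack ++ [c] := by
  unfold rpb_step
  rw [if_neg]
  rcases hl : stack.getLast? with _ | t
  · simp
  · rcases h t hl with hm | he
    · simp [hm]
    · subst he; simp

theorem rpb_step_pop (pair : List String) (stack : List Char) (c t : Char)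
    (hmem : String.singleton c ∈ pair) (hl : stack.getLast? = some t)
    (ht : String.singleton t ∈ pair) (hne : t ≠ c) :
    rpb_step pair stack c = stack.dropLast := by
  unfold rpb_step
  rw [if_pos]
  simp [hl, hmem, ht, hne]

theorem rp_step_inv (pair : List String) (st : List String × Int × Int × Bool) (stack : List Char)
    (c : Char) (hinv : rpInv pair st stack)
    (hc : ∀ i, PySem.List.index? pair (String.singleton c) = some i → i < 2) :
    rpInv pair (rp_step pair st c) (rpb_step pair stack c) := by
  obtain ⟨res, c0, c1, ps⟩ := st
  obtain ⟨h0, h1, hps, hp0, hp1, hlast, hstack⟩ := hinv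
  by_cases hmem : String.singleton c ∈ pair
  · -- c is a pair character
    obtain ⟨i, hidx⟩ := Option.isSome_iff_exists.mp
      ((PySem.List.index?_isSome_iff pair (String.singleton c)).mpr hmem)
    have hi2 : i < 2 := hc i hidx
    obtain ⟨hk, hgeq, hmin⟩ := PySem.List.getElem_of_index?_eq_some hidx
    rw [rp_step_def, if_neg (not_not_intro hmem), hidx]
    interval_cases i
    · -- pair.index(c) = 0
      have hget0 : pair[0]? = some (String.singleton c) := by
        rw [List.getElem?_eq_getElem hk, hgeq]
      rcases lt_trichotomy c1 c0 with hlt | heq | hgt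
      · -- residue is made of c itself: B pushes, the run grows
        have hres : rpResid pair c0 c1 = List.replicate ((c0 - c1 - 1).toNat + 1) c := by
          rw [rpResid_lt pair c0 c1 c hlt hget0]; congr 1; omega
        have hbs : rpb_step pair stack c = stack ++ [c] := by
          refine rpb_step_push pair stack c fun t hl => ?_
          rw [hstack, hres, getLast?_append_replicate_succ] at hl
          exact Or.inr (Option.some.inj hl).symm
        refine ⟨by omega, h1, fun h => by simp at h, fun _ => ⟨c, hget0⟩, hp1, hlast, ?_⟩
        rw [hbs, hstack, hres, rpResid_lt pair (c0 + 1) c1 c (by omega) hget0]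
        rw [show (c0 + 1 - c1).toNat = (c0 - c1 - 1).toNat + 1 + 1 by omega]
        rw [List.replicate_succ' (n := (c0 - c1 - 1).toNat + 1)]
        simp
      · -- residue empty: the stack top (if any) is a non-pair char, B pushes
        have hres : rpResid pair c0 c1 = [] := rpResid_eq0 pair c0 c1 (by omega)
        have hbs : rpb_step pair stack c = stack ++ [c] := by
          refine rpb_step_push pair stack c fun t hl => ?_
          rw [hstack, hres, List.append_nil] at hl
          exact Or.inl (hlast t hl)
        refine ⟨by omega, h1, fun h => by simp at h, fun _ => ⟨c, hget0⟩, hp1, hlast, ?_⟩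
        rw [hbs, hstack, hres, rpResid_lt pair (c0 + 1) c1 c (by omega) hget0]
        rw [show (c0 + 1 - c1).toNat = 1 by omega]
        simp
      · -- residue made of the opposite symbol: B cancels
        obtain ⟨ch, hch1, hne0⟩ := hp1 (by omega)
        have hchmem : String.singleton ch ∈ pair := List.mem_of_getElem? hch1
        have hne : ch ≠ c := fun h => hne0 (h ▸ hget0)
        have hres : rpResid pair c0 c1 = List.replicate ((c1 - c0 - 1).toNat + 1) ch := by
          rw [rpResid_gt pair c0 c1 ch hgt hch1]; congr 1; omega
        have htop : stack.getLast? = some ch := by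
          rw [hstack, hres, getLast?_append_replicate_succ]
        have hbs : rpb_step pair stack c = stack.dropLast :=
          rpb_step_pop pair stack c ch hmem htop hchmem hne
        refine ⟨by omega, h1, fun h => by simp at h, fun _ => ⟨c, hget0⟩, hp1, hlast, ?_⟩
        rw [hbs, hstack, hres, dropLast_append_replicate_succ]
        have hres' : rpResid pair (c0 + 1) c1 = List.replicate (c1 - c0 - 1).toNat ch := by
          rcases eq_or_lt_of_le (show c0 + 1 ≤ c1 by omega) with h | h
          · rw [rpResid_eq0 pair _ _ h, show (c1 - c0 - 1).toNat = 0 by omega]; rfl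
          · rw [rpResid_gt pair (c0 + 1) c1 ch h hch1]; congr 1; omega
        rw [hres']
    · -- pair.index(c) = 1
      have hlen0 : 0 < pair.length := by omega
      have hget1 : pair[1]? = some (String.singleton c) := by
        rw [List.getElem?_eq_getElem hk, hgeq]
      have hne0 : pair[0]? ≠ some (String.singleton c) := by
        rw [List.getElem?_eq_getElem hlen0]
        intro h
        exact hmin 0 (by omega) (Option.some.inj h)
      rcases lt_trichotomy c0 c1 with hlt | heq | hgt
      · -- residue is made of c itself: B pushes, the run grows
        have hres : rpResid pair c0 c1 = List.replicate ((c1 - c0 - 1).toNat + 1) c := by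
          rw [rpResid_gt pair c0 c1 c hlt hget1]; congr 1; omega
        have hbs : rpb_step pair stack c = stack ++ [c] := by
          refine rpb_step_push pair stack c fun t hl => ?_
          rw [hstack, hres, getLast?_append_replicate_succ] at hl
          exact Or.inr (Option.some.inj hl).symm
        refine ⟨h0, by omega, fun h => by simp at h, hp0, fun _ => ⟨c, hget1, hne0⟩, hlast, ?_⟩
        rw [hbs, hstack, hres, rpResid_gt pair c0 (c1 + 1) c (by omega) hget1]
        rw [show (c1 + 1 - c0).toNat = (c1 - c0 - 1).toNat + 1 + 1 by omega]
        rw [List.replicate_succ' (n := (c1 - c0 - 1).toNat + 1)]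
        simp
      · -- residue empty: the stack top (if any) is a non-pair char, B pushes
        have hres : rpResid pair c0 c1 = [] := rpResid_eq0 pair c0 c1 (by omega)
        have hbs : rpb_step pair stack c = stack ++ [c] := by
          refine rpb_step_push pair stack c fun t hl => ?_
          rw [hstack, hres, List.append_nil] at hl
          exact Or.inl (hlast t hl)
        refine ⟨h0, by omega, fun h => by simp at h, hp0, fun _ => ⟨c, hget1, hne0⟩, hlast, ?_⟩
        rw [hbs, hstack, hres, rpResid_gt pair c0 (c1 + 1) c (by omega) hget1]
        rw [show (c1 + 1 - c0).toNat = 1 by omega]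
        simp
      · -- residue made of the opposite symbol: B cancels
        obtain ⟨ch, hch⟩ := hp0 (by omega)
        have hchmem : String.singleton ch ∈ pair := List.mem_of_getElem? hch
        have hne : ch ≠ c := fun h => hne0 (h ▸ hch)
        have hres : rpResid pair c0 c1 = List.replicate ((c0 - c1 - 1).toNat + 1) ch := by
          rw [rpResid_lt pair c0 c1 ch hgt hch]; congr 1; omega
        have htop : stack.getLast? = some ch := by
          rw [hstack, hres, getLast?_append_replicate_succ]
        have hbs : rpb_step pair stack c = stack.dropLast :=
          rpb_step_pop pair stack c ch hmem htop hchmem hne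
        refine ⟨h0, by omega, fun h => by simp at h, hp0, fun _ => ⟨c, hget1, hne0⟩, hlast, ?_⟩
        rw [hbs, hstack, hres, dropLast_append_replicate_succ]
        have hres' : rpResid pair c0 (c1 + 1) = List.replicate (c0 - c1 - 1).toNat ch := by
          rcases eq_or_lt_of_le (show c1 + 1 ≤ c0 by omega) with h | h
          · rw [rpResid_eq0 pair _ _ h.symm, show (c0 - c1 - 1).toNat = 0 by omega]; rfl
          · rw [rpResid_lt pair c0 (c1 + 1) ch h hch]; congr 1; omega
        rw [hres']
  · -- c is not a pair character: A flushes the run (if any) and appends, B pushes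
    have hbs : rpb_step pair stack c = stack ++ [c] := by
      unfold rpb_step
      rw [if_neg]
      simp [hmem]
    rw [rp_step_def, if_pos hmem, hbs]
    have hlast' : ∀ (r : List String) (t : Char),
        (rpRender (r ++ [String.singleton c])).getLast? = some t → String.singleton t ∉ pair := by
      intro r t ht
      rw [rpRender_append_singleton, show (String.singleton c).toList = [c] by simp,
        List.getLast?_concat] at ht
      cases ht
      exact hmem
    cases ps
    · obtain ⟨hz0, hz1⟩ := hps rfl
      subst hz0; subst hz1
      refine ⟨le_refl 0, le_refl 0, fun _ => ⟨rfl, rfl⟩, fun h => by omega, fun h => by omega,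
        hlast' res, ?_⟩
      rw [hstack]
      simp [rpResid_eq0 pair 0 0 rfl, rpRender_append_singleton]
    · refine ⟨le_refl 0, le_refl 0, fun _ => ⟨rfl, rfl⟩, fun h => by omega, fun h => by omega,
        hlast' _, ?_⟩
      rw [hstack]
      simp [rpResid_eq0 pair 0 0 rfl, rpRender_append_singleton, rpRender_endSeq]

theorem rp_fold_inv (pair : List String) (l : List Char)
    (hl : ∀ c ∈ l, ∀ i, PySem.List.index? pair (String.singleton c) = some i → i < 2)
    (st : List String × Int × Int × Bool) (stack : List Char) (hinv : rpInv pair st stack) :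
    rpInv pair (l.foldl (rp_step pair) st) (l.foldl (rpb_step pair) stack) := by
  induction l generalizing st stack with
  | nil => exact hinv
  | cons c l ih =>
    exact ih (fun d hd => hl d (List.mem_cons_of_mem _ hd)) _ _
      (rp_step_inv pair st stack c hinv (hl c (List.mem_cons_self)))

theorem intercalate_nil_flatten (xs : List (List Char)) : List.intercalate [] xs = xs.flatten := by
  induction xs with
  | nil => simp [List.intercalate]
  | cons a t ih => cases t <;> simp_all [List.intercalate]

theorem join_empty_toList (xs : List String) : (PySem.Str.join "" xs).toList = rpRender xs := by
  rw [PySem.Str.toList_join]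
  simp [PySem.Chars.join, rpRender, intercalate_nil_flatten]

theorem rpInv_init (pair : List String) : rpInv pair ([], 0, 0, false) [] := by
  refine ⟨by omega, by omega, fun _ => ⟨rfl, rfl⟩, by omega, by omega, ?_, ?_⟩
  · intro t ht; simp [rpRender] at ht
  · simp [rpRender, rpResid]

-- ===== VERDICT (by name: the statement is the Claim_ definition above) =====
theorem remove_pairs_spec : Claim_equal_remove_pairs := by
  intro s pair _ hpre
  unfold Spec_remove_pairs remove_pairs remove_pairs_alt
  have hpre' : ∀ c ∈ s.toList, (PySem.List.index? pair (String.singleton c)).getD 0 < 2 := by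
    unfold Pre_remove_pairs at hpre
    rw [List.all_eq_true] at hpre
    exact fun c hcm => of_decide_eq_true (hpre c hcm)
  have h := rp_fold_inv pair s.toList
    (fun c hcm i hi => by have := hpre' c hcm; rw [hi] at this; simpa using this)
    ([], 0, 0, false) [] (rpInv_init pair)
  obtain ⟨_, _, _, _, _, _, hstack⟩ := h
  rw [hstack, ← rpRender_endSeq, ← join_empty_toList, String.ofList_toList]
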